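-- pv_equiv track=rewrite | github.com/melekdncrr-mlk/riskSimAI | app.py | ticker_label
-- ===== SOURCE A (Python) =====
-- PULSE_ASSETS = [
--     {"label": "Gram Altın",  "ticker": "_GRAMGOLD", "suffix": " ₺", "icon": "🥇"},
--     {"label": "Ons Altın",   "ticker": "GC=F",      "suffix": " $", "icon": "✨"},
--     {"label": "Gümüş",       "ticker": "SI=F",       "suffix": " $", "icon": "🥈"},
--     {"label": "USD/TRY",     "ticker": "USDTRY=X",   "suffix": " ₺", "icon": "💵"},
--     {"label": "EUR/TRY",     "ticker": "EURTRY=X",   "suffix": " ₺", "icon": "💶"},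
--     {"label": "BIST 100",    "ticker": "XU100.IS",   "suffix": "",   "icon": "📈"},
--     {"label": "ASELSAN",     "ticker": "ASELS.IS",   "suffix": " ₺", "icon": "🎯"},
--     {"label": "THY",         "ticker": "THYAO.IS",   "suffix": " ₺", "icon": "✈️"},
--     {"label": "Garanti",     "ticker": "GARAN.IS",   "suffix": " ₺", "icon": "🏦"},
--     {"label": "S&P 500",     "ticker": "^GSPC",      "suffix": "",   "icon": "🇺🇸"},
--     {"label": "Bitcoin",     "ticker": "BTC-USD",    "suffix": " $", "icon": "₿"},
-- ]
--
-- SIM_ASSETS = {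
--     "Gram Altın":   "_GRAMGOLD",
--     "Ons Altın":    "GC=F",
--     "Gümüş":        "SI=F",
--     "USD/TRY":      "USDTRY=X",
--     "EUR/TRY":      "EURTRY=X",
--     "BIST 100":     "XU100.IS",
--     "ASELSAN":      "ASELS.IS",
--     "THY":          "THYAO.IS",
--     "Garanti":      "GARAN.IS",
--     "S&P 500":      "^GSPC",
--     "Bitcoin":      "BTC-USD",
--     "Ethereum":     "ETH-USD",
-- }
--
-- def ticker_label(t: str) -> str:
--     for a in PULSE_ASSETS:
--         if a["ticker"] == t:
--             return a["label"]
--     for n, tick in SIM_ASSETS.items():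
--         if tick == t:
--             return n
--     return t
-- ===== SOURCE B (Python) =====
-- PULSE_ASSETS = [
--     {"label": "Gram Altın",  "ticker": "_GRAMGOLD", "suffix": " ₺", "icon": "🥇"},
--     {"label": "Ons Altın",   "ticker": "GC=F",      "suffix": " $", "icon": "✨"},
--     {"label": "Gümüş",       "ticker": "SI=F",       "suffix": " $", "icon": "🥈"},
--     {"label": "USD/TRY",     "ticker": "USDTRY=X",   "suffix": " ₺", "icon": "💵"},
--     {"label": "EUR/TRY",     "ticker": "EURTRY=X",   "suffix": " ₺", "icon": "💶"},
--     {"label": "BIST 100",    "ticker": "XU100.IS",   "suffix": "",   "icon": "📈"},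
--     {"label": "ASELSAN",     "ticker": "ASELS.IS",   "suffix": " ₺", "icon": "🎯"},
--     {"label": "THY",         "ticker": "THYAO.IS",   "suffix": " ₺", "icon": "✈️"},
--     {"label": "Garanti",     "ticker": "GARAN.IS",   "suffix": " ₺", "icon": "🏦"},
--     {"label": "S&P 500",     "ticker": "^GSPC",      "suffix": "",   "icon": "🇺🇸"},
--     {"label": "Bitcoin",     "ticker": "BTC-USD",    "suffix": " $", "icon": "₿"},
-- ]
--
-- SIM_ASSETS = {
--     "Gram Altın":   "_GRAMGOLD",
--     "Ons Altın":    "GC=F",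
--     "Gümüş":        "SI=F",
--     "USD/TRY":      "USDTRY=X",
--     "EUR/TRY":      "EURTRY=X",
--     "BIST 100":     "XU100.IS",
--     "ASELSAN":      "ASELS.IS",
--     "THY":          "THYAO.IS",
--     "Garanti":      "GARAN.IS",
--     "S&P 500":      "^GSPC",
--     "Bitcoin":      "BTC-USD",
--     "Ethereum":     "ETH-USD",
-- }
--
-- def ticker_label(t: str) -> str:
--     # Direct dispatch on the ticker: no scan over the asset tables at all.
--     # (PULSE and SIM agree on every shared ticker, so a flat table is exact;
--     #  "ETH-USD" appears only in SIM in the original, hence "Ethereum" here.)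
--     match t:
--         case "_GRAMGOLD": return "Gram Altın"
--         case "GC=F":      return "Ons Altın"
--         case "SI=F":      return "Gümüş"
--         case "USDTRY=X":  return "USD/TRY"
--         case "EURTRY=X":  return "EUR/TRY"
--         case "XU100.IS":  return "BIST 100"
--         case "ASELS.IS":  return "ASELSAN"
--         case "THYAO.IS":  return "THY"
--         case "GARAN.IS":  return "Garanti"
--         case "^GSPC":     return "S&P 500"
--         case "BTC-USD":   return "Bitcoin"
--         case "ETH-USD":   return "Ethereum"
--         case _:           return t
-- ===== Notes on version B (the rewrite author's own statement) =====
-- stated objective: idiomatic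
-- what changed: B replaces A's two sequential scans over the asset tables (PULSE list then SIM dict items) with a flat match/case dispatch on the ticker that returns each label directly, no table traversal at all.
import Mathlib
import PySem

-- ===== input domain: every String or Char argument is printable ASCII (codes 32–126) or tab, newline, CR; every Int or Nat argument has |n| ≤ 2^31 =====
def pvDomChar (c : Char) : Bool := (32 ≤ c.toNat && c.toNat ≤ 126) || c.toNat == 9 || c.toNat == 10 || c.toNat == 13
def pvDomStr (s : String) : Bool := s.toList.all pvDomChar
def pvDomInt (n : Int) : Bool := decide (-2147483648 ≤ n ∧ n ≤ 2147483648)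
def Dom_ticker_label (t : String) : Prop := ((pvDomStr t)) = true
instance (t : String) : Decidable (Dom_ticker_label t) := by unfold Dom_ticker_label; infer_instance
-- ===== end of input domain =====

-- B replaces A's two sequential scans with a flat match/case dispatch on the ticker (idiomatic,
-- no table traversal); same return value on every input.

-- ===== PORT A =====
-- Each PULSE asset kept as its (label, ticker) pair — the only fields A's loop reads.
def pvPulseAssets : List (String × String) :=
  [("Gram Altın","_GRAMGOLD"),("Ons Altın","GC=F"),("Gümüş","SI=F"),("USD/TRY","USDTRY=X"),
   ("EUR/TRY","EURTRY=X"),("BIST 100","XU100.IS"),("ASELSAN","ASELS.IS"),("THY","THYAO.IS"),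
   ("Garanti","GARAN.IS"),("S&P 500","^GSPC"),("Bitcoin","BTC-USD")]

def pvSimAssets : PySem.Dict String String := PySem.Dict.ofList
  [("Gram Altın","_GRAMGOLD"),("Ons Altın","GC=F"),("Gümüş","SI=F"),("USD/TRY","USDTRY=X"),
   ("EUR/TRY","EURTRY=X"),("BIST 100","XU100.IS"),("ASELSAN","ASELS.IS"),("THY","THYAO.IS"),
   ("Garanti","GARAN.IS"),("S&P 500","^GSPC"),("Bitcoin","BTC-USD"),("Ethereum","ETH-USD")]

-- first loop of A: return a["label"] on the first a with a["ticker"] == t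
def pvPulseScan (t : String) : List (String × String) → Option String
  | [] => none
  | (label, ticker) :: rest => if ticker == t then some label else pvPulseScan t rest

-- second loop of A: over SIM_ASSETS.items(), return n on the first tick == t
def pvSimScan (t : String) : List (String × String) → Option String
  | [] => none
  | (n, tick) :: rest => if tick == t then some n else pvSimScan t rest

def ticker_label (t : String) : String :=
  match pvPulseScan t pvPulseAssets with
  | some l => l
  | none =>
    match pvSimScan t pvSimAssets.items with
    | some n => n
    | none => t

-- ===== PORT B =====
-- Source B's match/case dispatch, case for case
def ticker_label_alt (t : String) : String :=
  if t = "_GRAMGOLD" then "Gram Altın"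
  else if t = "GC=F" then "Ons Altın"
  else if t = "SI=F" then "Gümüş"
  else if t = "USDTRY=X" then "USD/TRY"
  else if t = "EURTRY=X" then "EUR/TRY"
  else if t = "XU100.IS" then "BIST 100"
  else if t = "ASELS.IS" then "ASELSAN"
  else if t = "THYAO.IS" then "THY"
  else if t = "GARAN.IS" then "Garanti"
  else if t = "^GSPC" then "S&P 500"
  else if t = "BTC-USD" then "Bitcoin"
  else if t = "ETH-USD" then "Ethereum"
  else t

-- ===== PRECONDITION & SPEC =====
def Spec_ticker_label (t : String) (out : String) : Prop := out = ticker_label_alt t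
instance (t : String) (out : String) : Decidable (Spec_ticker_label t out) := by unfold Spec_ticker_label; infer_instance

-- ===== CLAIM (what is proved, stated in full; the proofs are below) =====
def Claim_equal_ticker_label : Prop := ∀ (t : String), Dom_ticker_label t → Spec_ticker_label t (ticker_label t)

-- ===== LEMMAS AND PROOFS =====
-- all tickers either program can match
def pvAllTickers : List String :=
  ["_GRAMGOLD","GC=F","SI=F","USDTRY=X","EURTRY=X","XU100.IS","ASELS.IS","THYAO.IS",
   "GARAN.IS","^GSPC","BTC-USD","ETH-USD"]

theorem pvSimItems_eval : pvSimAssets.items =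
    [("Gram Altın","_GRAMGOLD"),("Ons Altın","GC=F"),("Gümüş","SI=F"),("USD/TRY","USDTRY=X"),
     ("EUR/TRY","EURTRY=X"),("BIST 100","XU100.IS"),("ASELSAN","ASELS.IS"),("THY","THYAO.IS"),
     ("Garanti","GARAN.IS"),("S&P 500","^GSPC"),("Bitcoin","BTC-USD"),("Ethereum","ETH-USD")] := by
  decide

theorem ticker_label_eq_alt (t : String) : ticker_label t = ticker_label_alt t := by
  by_cases h : t ∈ pvAllTickers
  · simp only [pvAllTickers, List.mem_cons, List.not_mem_nil, or_false] at h
    rcases h with h|h|h|h|h|h|h|h|h|h|h|h <;> subst h <;> decide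
  · simp only [pvAllTickers, List.mem_cons, List.not_mem_nil, or_false, not_or] at h
    obtain ⟨h1,h2,h3,h4,h5,h6,h7,h8,h9,h10,h11,h12⟩ := h
    simp [ticker_label, ticker_label_alt, pvSimItems_eval, pvPulseAssets,
      pvPulseScan, pvSimScan,
      Ne.symm h1, Ne.symm h2, Ne.symm h3, Ne.symm h4, Ne.symm h5, Ne.symm h6,
      Ne.symm h7, Ne.symm h8, Ne.symm h9, Ne.symm h10, Ne.symm h11, Ne.symm h12,
      h1, h2, h3, h4, h5, h6, h7, h8, h9, h10, h11, h12]

-- ===== VERDICT (by name: the statement is the Claim_ definition above) =====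
theorem ticker_label_spec : Claim_equal_ticker_label := by
  intro t _
  unfold Spec_ticker_label
  exact ticker_label_eq_alt t
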